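-- pv_equiv track=rewrite | github.com/AndrewS-hash/pyFiddle | pyFiddle_Intermediate.py | is_woodall
-- ===== SOURCE A (Python) =====
-- def is_woodall(n: int) -> bool:
--     """
--     Check if the given number is a Woodall number.
--
--     Args:
--         n (int): The number to check.
--
--     Returns:
--         bool: True if n is a Woodall number, False otherwise.
--     """
--     # Implement the function logic here
--     a = 1
--     woodNum = lambda a: (a * pow(2, a)) - 1
--
--     while woodNum(a) <= n:
--         if woodNum(a) == n:
--             return True
--         a += 1
--     return False
-- ===== SOURCE B (Python) =====
-- def is_woodall(n: int) -> bool: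
--     """Binary search for a with a*2**a - 1 == n over the monotone Woodall sequence."""
--     if n < 1:
--         return False
--     lo, hi = 1, n.bit_length() + 2
--     while lo <= hi:
--         mid = (lo + hi) // 2
--         w = mid * pow(2, mid) - 1
--         if w == n:
--             return True
--         if w < n:
--             lo = mid + 1
--         else:
--             hi = mid - 1
--     return False
-- ===== Notes on version B (the rewrite author's own statement) =====
-- stated objective: faster
-- what changed: Replaces A's sequential scan over successive Woodall indices with a binary search for the index over the range bounded by the bit length of n, exploiting monotonicity of the Woodall sequence.
import Mathlib
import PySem

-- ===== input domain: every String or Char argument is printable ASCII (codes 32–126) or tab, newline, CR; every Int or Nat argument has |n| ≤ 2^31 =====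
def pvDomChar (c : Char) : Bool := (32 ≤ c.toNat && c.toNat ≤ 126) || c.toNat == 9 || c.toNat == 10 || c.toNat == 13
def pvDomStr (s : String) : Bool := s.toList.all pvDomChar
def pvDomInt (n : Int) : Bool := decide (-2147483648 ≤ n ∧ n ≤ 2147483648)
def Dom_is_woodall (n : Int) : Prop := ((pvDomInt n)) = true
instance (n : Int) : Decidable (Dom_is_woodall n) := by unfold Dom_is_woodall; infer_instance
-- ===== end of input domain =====

-- B replaces A's sequential scan with a binary search over the monotone Woodall index (fewer loop iterations; measured speed difference was below timing resolution).

-- a ≤ a * 2^a.toNat  (used for termination of A's loop)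
theorem pvWoodLower (a : Int) : a ≤ a * 2 ^ a.toNat := by
  rcases (by omega : a ≤ 0 ∨ 0 < a) with h | h
  · have : a.toNat = 0 := Int.toNat_of_nonpos h
    simp [this]
  · calc a = a * 1 := (mul_one a).symm
      _ ≤ a * 2 ^ a.toNat := by
        apply mul_le_mul_of_nonneg_left _ h.le
        exact one_le_pow₀ (by norm_num)

-- ===== PORT A =====
-- the while-loop of A: scan successive indices while a*2^a - 1 ≤ n
def pvLoopA (n a : Int) : Bool :=
  if _h : a * 2 ^ a.toNat - 1 ≤ n then
    if a * 2 ^ a.toNat - 1 = n then true else pvLoopA n (a + 1)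
  else false
termination_by (n + 2 - a).toNat
decreasing_by
  have := pvWoodLower a
  omega

def is_woodall (n : Int) : Bool := pvLoopA n 1

-- ===== PORT B =====
-- the while-loop of B: binary search over [lo, hi] (mid is always ≥ 1 here, so pow(2, mid) = 2^mid.toNat)
def pvLoopB (n lo hi : Int) : Bool :=
  if _h : lo ≤ hi then
    let mid := PySem.Int.floordiv (lo + hi) 2
    if mid * 2 ^ mid.toNat - 1 = n then true
    else if mid * 2 ^ mid.toNat - 1 < n then pvLoopB n (mid + 1) hi
    else pvLoopB n lo (mid - 1)
  else false
termination_by (hi + 1 - lo).toNat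
decreasing_by
  · have := PySem.Int.floordiv_two_mid_bounds _h
    omega
  · have := PySem.Int.floordiv_two_mid_bounds _h
    omega

def is_woodall_alt (n : Int) : Bool :=
  if n < 1 then false
  else pvLoopB n 1 ((PySem.Int.bitLength n : Int) + 2)

-- ===== PRECONDITION & SPEC =====
def Spec_is_woodall (n : Int) (out : Bool) : Prop := out = is_woodall_alt n
instance (n : Int) (out : Bool) : Decidable (Spec_is_woodall n out) := by unfold Spec_is_woodall; infer_instance

-- ===== CLAIM (what is proved, stated in full; the proofs are below) =====
def Claim_equal_is_woodall : Prop := ∀ (n : Int), Dom_is_woodall n → Spec_is_woodall n (is_woodall n)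

-- ===== LEMMAS AND PROOFS =====

-- strict monotonicity of the Woodall sequence on indices ≥ 1
theorem pvWoodMono {a b : Int} (ha : 1 ≤ a) (hab : a < b) :
    a * 2 ^ a.toNat < b * 2 ^ b.toNat := by
  have ha' : 0 < a := ha
  have hb' : 0 < b := lt_trans ha' hab
  have hta : a.toNat < b.toNat := by omega
  have h1 : a * 2 ^ a.toNat ≤ a * 2 ^ b.toNat := by
    apply mul_le_mul_of_nonneg_left _ ha'.le
    exact pow_le_pow_right₀ (by norm_num) hta.le
  have h2 : a * 2 ^ b.toNat < b * 2 ^ b.toNat := by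
    apply mul_lt_mul_of_pos_right hab
    positivity
  omega

theorem pvWoodMonoLe {a b : Int} (ha : 1 ≤ a) (hab : a ≤ b) :
    a * 2 ^ a.toNat ≤ b * 2 ^ b.toNat := by
  rcases eq_or_lt_of_le hab with rfl | h
  · exact le_refl _
  · exact (pvWoodMono ha h).le

-- A's loop returns true iff some index ≥ a hits n
theorem pvLoopA_iff (n a : Int) (ha : 1 ≤ a) :
    pvLoopA n a = true ↔ ∃ b, a ≤ b ∧ b * 2 ^ b.toNat - 1 = n := by
  fun_induction pvLoopA n a with
  | case1 a h heq =>
    simp only [true_iff]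
    exact ⟨a, le_refl a, heq⟩
  | case2 a h hne ih =>
    rw [ih (by omega)]
    constructor
    · rintro ⟨b, hb, hbn⟩; exact ⟨b, by omega, hbn⟩
    · rintro ⟨b, hb, hbn⟩
      refine ⟨b, ?_, hbn⟩
      rcases eq_or_lt_of_le hb with rfl | h'
      · exact absurd hbn hne
      · omega
  | case3 a h =>
    simp only [Bool.false_eq_true, false_iff]
    rintro ⟨b, hb, hbn⟩
    have := pvWoodMonoLe ha hb
    omega

-- B's loop returns true iff some index in [lo, hi] hits n
theorem pvLoopB_iff (n lo hi : Int) (hlo : 1 ≤ lo) :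
    pvLoopB n lo hi = true ↔ ∃ b, lo ≤ b ∧ b ≤ hi ∧ b * 2 ^ b.toNat - 1 = n := by
  fun_induction pvLoopB n lo hi with
  | case1 lo hi h mid heq =>
    have hm := PySem.Int.floordiv_two_mid_bounds h
    simp only [true_iff]
    exact ⟨mid, hm.1, hm.2, heq⟩
  | case2 lo hi h mid hne hlt ih =>
    have hm := PySem.Int.floordiv_two_mid_bounds h
    rw [ih (by omega)]
    constructor
    · rintro ⟨b, h1, h2, h3⟩; exact ⟨b, by omega, h2, h3⟩
    · rintro ⟨b, h1, h2, h3⟩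
      refine ⟨b, ?_, h2, h3⟩
      by_contra hb
      have : b ≤ mid := by omega
      have := pvWoodMonoLe (by omega : (1:Int) ≤ b) this
      omega
  | case3 lo hi h mid hne hge ih =>
    have hm := PySem.Int.floordiv_two_mid_bounds h
    rw [ih hlo]
    constructor
    · rintro ⟨b, h1, h2, h3⟩; exact ⟨b, h1, by omega, h3⟩
    · rintro ⟨b, h1, h2, h3⟩
      refine ⟨b, h1, ?_, h3⟩
      by_contra hb
      have : mid ≤ b := by omega
      have := pvWoodMonoLe (by omega : (1:Int) ≤ mid) this
      omega
  | case4 lo hi h =>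
    simp only [Bool.false_eq_true, false_iff]
    rintro ⟨b, h1, h2, _⟩
    omega

-- any Woodall index hitting n is at most bitLength n
theorem pvIndexBound {n b : Int} (hn : 1 ≤ n) (hb : 1 ≤ b)
    (hbn : b * 2 ^ b.toNat - 1 = n) : b ≤ (PySem.Int.bitLength n : Int) := by
  have hpow : (2 : Int) ^ b.toNat ≤ n + 1 := by
    have : (1 : Int) * 2 ^ b.toNat ≤ b * 2 ^ b.toNat := by
      apply mul_le_mul_of_nonneg_right hb
      positivity
    omega
  have hlt : n.natAbs < 2 ^ PySem.Int.bitLength n := PySem.Int.lt_two_pow_bitLength n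
  have hlt' : n < (2 : Int) ^ PySem.Int.bitLength n := by
    have : (n.natAbs : Int) < ((2 : Nat) ^ PySem.Int.bitLength n : Nat) := by exact_mod_cast hlt
    rw [Int.natAbs_of_nonneg (by omega)] at this
    push_cast at this
    exact this
  have hle : (2 : Int) ^ b.toNat ≤ 2 ^ PySem.Int.bitLength n := by omega
  have : b.toNat ≤ PySem.Int.bitLength n := by
    by_contra hc
    have hc' : PySem.Int.bitLength n < b.toNat := by omega
    have : (2 : Int) ^ PySem.Int.bitLength n < 2 ^ b.toNat :=
      pow_lt_pow_right₀ (by norm_num) hc'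
    omega
  omega

-- ===== VERDICT (by name: the statement is the Claim_ definition above) =====
theorem is_woodall_spec : Claim_equal_is_woodall := by
  unfold Claim_equal_is_woodall Spec_is_woodall
  intro n _
  rw [Bool.eq_iff_iff]
  unfold is_woodall is_woodall_alt
  rw [pvLoopA_iff n 1 (le_refl 1)]
  by_cases hn : n < 1
  · simp only [hn, if_pos, Bool.false_eq_true, iff_false]
    rintro ⟨b, hb, hbn⟩
    have h1 : (1 : Int) * 2 ^ (1 : Int).toNat ≤ b * 2 ^ b.toNat := pvWoodMonoLe (le_refl 1) hb
    norm_num at h1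
    omega
  · replace hn : 1 ≤ n := by omega
    rw [if_neg (by omega)]
    rw [pvLoopB_iff n 1 _ (le_refl 1)]
    constructor
    · rintro ⟨b, hb, hbn⟩
      exact ⟨b, hb, by have := pvIndexBound hn hb hbn; omega, hbn⟩
    · rintro ⟨b, hb, _, hbn⟩
      exact ⟨b, hb, hbn⟩
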